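-- pv_equiv track=rewrite | github.com/mchang21/Advent_Of_Code | 2021/Day_03/advent_03.py | find_gamma_and_epsilon
-- ===== SOURCE A (Python) =====
-- def find_gamma_and_epsilon(data):
--     n = len(data)
--     bit_count = [0 for _ in range(len(data[0]))]
--     gamma_rate = ""
--     epsilon_rate = ""
--
--     for d in data:
--         # count number of 1 bits in each position
--         for i in range(len(d)):
--             bit = int(d[i])
--             if bit:
--                 bit_count[i] += 1
--
--     # get gamma rate and epsilon rate from bit_count
--     for count in bit_count:
--         # if 1 is the most common bit
--         if count > n-count:
--             gamma_rate += "1"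
--             epsilon_rate += "0"
--         # if 0 is the most common bit
--         else:
--             gamma_rate += "0"
--             epsilon_rate += "1"
--
--     return int(gamma_rate, 2) * int(epsilon_rate, 2)
-- ===== SOURCE B (Python) =====
-- def find_gamma_and_epsilon(data):
--     n = len(data)
--     width = len(data[0])
--     gamma = 0
--     epsilon = 0
--     for i in range(width):
--         ones = sum(1 for d in data if i < len(d) and int(d[i]))
--         if ones > n - ones:
--             gamma = gamma * 2 + 1
--             epsilon = epsilon * 2
--         else:
--             gamma = gamma * 2
--             epsilon = epsilon * 2 + 1
--     return gamma * epsilon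
-- ===== Notes on version B (the rewrite author's own statement) =====
-- stated objective: simpler
-- what changed: B replaces A's three phases (row-major bit_count array, then building two binary strings, then int(.,2) parsing) by a single column-major loop that counts ones per column and maintains gamma/epsilon as running integers via doubling.
import Mathlib
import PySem

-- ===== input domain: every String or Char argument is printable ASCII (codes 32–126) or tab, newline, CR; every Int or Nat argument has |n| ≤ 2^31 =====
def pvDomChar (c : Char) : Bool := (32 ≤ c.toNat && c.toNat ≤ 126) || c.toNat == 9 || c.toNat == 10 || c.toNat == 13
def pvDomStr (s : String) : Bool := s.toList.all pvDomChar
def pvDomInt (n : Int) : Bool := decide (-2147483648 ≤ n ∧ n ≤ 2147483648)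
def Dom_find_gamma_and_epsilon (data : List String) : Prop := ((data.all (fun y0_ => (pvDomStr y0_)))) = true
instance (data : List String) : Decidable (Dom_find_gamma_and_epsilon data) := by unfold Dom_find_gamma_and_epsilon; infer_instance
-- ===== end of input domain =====

-- B: one column-major pass keeping gamma/epsilon as running integers, instead of A's
-- bit_count array plus binary-string building and int(.,2) parsing. Same cost, simpler.

-- int(c) for a single character c: value of a digit; on a non-digit Python raises
-- ValueError — those inputs are excluded by Pre_ (0 here is an arbitrary default).
def pvCInt (c : Char) : Int := if c.isDigit then (c.toNat : Int) - 48 else 0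

-- ===== PORT A =====
-- int(s, 2) for the '0'/'1'-strings A builds (exact there; strings kept as List Char)
def pvParseBin (s : List Char) : Int :=
  s.foldl (fun acc c => 2 * acc + (if c = '1' then 1 else 0)) 0

-- A's inner loop: for i in range(len(d)): bit = int(d[i]); if bit: bit_count[i] += 1
-- bit_count[i] += 1 raises IndexError when i ≥ len(bit_count): excluded by Pre_
-- (List.set is a no-op there); d[i] is in range since i < len(d) by the loop bound.
def pvRowUpd (bc : List Int) (d : List Char) : List Int :=
  (List.range d.length).foldl
    (fun b i =>
      let bit : Int := pvCInt (d.getD i ' ')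
      if bit ≠ 0 then b.set i (b.getD i 0 + 1) else b) bc

def find_gamma_and_epsilon (data : List String) : Int :=
  let n : Int := data.length
  -- data[0] raises IndexError on empty data: excluded by Pre_ (headD "" is a default)
  let bc0 : List Int := List.replicate (data.headD "").toList.length 0
  let bc := data.foldl (fun b d => pvRowUpd b d.toList) bc0
  let ge := bc.foldl
    (fun (p : List Char × List Char) count =>
      if count > n - count then (p.1 ++ ['1'], p.2 ++ ['0'])
      else (p.1 ++ ['0'], p.2 ++ ['1'])) ([], [])
  pvParseBin ge.1 * pvParseBin ge.2

-- ===== PORT B =====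
-- ones = sum(1 for d in data if i < len(d) and int(d[i]))
def pvColOnes (data : List String) (i : Nat) : Int :=
  data.foldl
    (fun s d => if i < d.toList.length ∧ pvCInt (d.toList.getD i ' ') ≠ 0 then s + 1 else s) 0

def find_gamma_and_epsilon_alt (data : List String) : Int :=
  let n : Int := data.length
  -- data[0] raises IndexError on empty data: excluded by Pre_ (headD "" is a default)
  let width := (data.headD "").toList.length
  let ge := (List.range width).foldl
    (fun (p : Int × Int) i =>
      let ones := pvColOnes data i
      if ones > n - ones then (p.1 * 2 + 1, p.2 * 2) else (p.1 * 2, p.2 * 2 + 1)) (0, 0)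
  ge.1 * ge.2

-- ===== PRECONDITION & SPEC =====
-- Exactly the inputs where the Python A returns: data nonempty (else IndexError),
-- data[0] nonempty (else int("",2) ValueError), every character a digit (else
-- ValueError), and any character past column len(data[0]) equal to '0' (a nonzero
-- one triggers IndexError on bit_count).
def Pre_find_gamma_and_epsilon (data : List String) : Prop :=
  data ≠ [] ∧ 1 ≤ (data.headD "").toList.length ∧
  ∀ d ∈ data, d.toList.all Char.isDigit = true ∧
    (d.toList.drop (data.headD "").toList.length).all (fun c => c = '0') = true
instance (data : List String) : Decidable (Pre_find_gamma_and_epsilon data) := by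
  unfold Pre_find_gamma_and_epsilon; infer_instance
def pvWitness_find_gamma_and_epsilon : List String := ["10", "01", "11"]


def Spec_find_gamma_and_epsilon (data : List String) (out : Int) : Prop :=
  out = find_gamma_and_epsilon_alt data
instance (data : List String) (out : Int) : Decidable (Spec_find_gamma_and_epsilon data out) := by
  unfold Spec_find_gamma_and_epsilon; infer_instance

-- ===== CLAIM (what is proved, stated in full; the proofs are below) =====
def Claim_equal_find_gamma_and_epsilon : Prop :=
  ∀ (data : List String), Dom_find_gamma_and_epsilon data →
    Pre_find_gamma_and_epsilon data →
    Spec_find_gamma_and_epsilon data (find_gamma_and_epsilon data)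


-- ===== LEMMAS AND PROOFS =====

-- the body of A's inner loop, named for the proofs (pvRowUpd unfolds to it by rfl)
def pvG (d : List Char) (b : List Int) (i : Nat) : List Int :=
  if pvCInt (d.getD i ' ') ≠ 0 then b.set i (b.getD i 0 + 1) else b

theorem pvRowUpd_eq (bc : List Int) (d : List Char) :
    pvRowUpd bc d = (List.range d.length).foldl (pvG d) bc := rfl

-- getD after set, in range
theorem pv_getD_set (b : List Int) (i j : Nat) (v : Int) (hj : j < b.length) :
    (b.set i v).getD j 0 = if i = j then v else b.getD j 0 := by
  rcases eq_or_ne i j with rfl|h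
  · simp [List.getD_eq_getElem?_getD, hj]
  · simp [List.getD_eq_getElem?_getD, List.getElem?_set_ne h, h]

theorem pvG_foldl_length (d : List Char) (l : List Nat) : ∀ (bc : List Int),
    (l.foldl (pvG d) bc).length = bc.length := by
  induction l with
  | nil => intro bc; rfl
  | cons i l ih =>
    intro bc
    simp only [List.foldl_cons]
    rw [ih]
    unfold pvG; split <;> simp

theorem pvG_foldl_getD (d : List Char) (l : List Nat) (hn : l.Nodup) :
    ∀ (bc : List Int) (j : Nat), j < bc.length →
    (l.foldl (pvG d) bc).getD j 0 =
      bc.getD j 0 + (if j ∈ l ∧ pvCInt (d.getD j ' ') ≠ 0 then 1 else 0) := by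
  induction l with
  | nil => intro bc j hj; simp
  | cons i l ih =>
    intro bc j hj
    simp only [List.foldl_cons]
    have hn' := hn
    rw [List.nodup_cons] at hn'
    have hlen : (pvG d bc i).length = bc.length := by unfold pvG; split <;> simp
    rw [ih hn'.2 _ j (by omega)]
    rcases eq_or_ne i j with rfl|hij
    · have hjl : i ∉ l := hn'.1
      by_cases hb : pvCInt (d.getD i ' ') ≠ 0
      · simp only [pvG, if_pos hb]
        rw [pv_getD_set _ _ _ _ hj]
        simp [hjl]
        simpa [List.getD_eq_getElem?_getD] using hb
      · simp only [pvG, if_neg hb]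
        simp at hb
        simp [hjl, hb]
    · have h1 : (pvG d bc i).getD j 0 = bc.getD j 0 := by
        unfold pvG; split
        · rw [pv_getD_set _ _ _ _ hj]; simp [hij]
        · rfl
      rw [h1]
      have h2 : (j ∈ i :: l) ↔ j ∈ l := by simp [List.mem_cons, Ne.symm hij]
      simp only [h2]

theorem pvRowUpd_length (bc : List Int) (d : List Char) :
    (pvRowUpd bc d).length = bc.length := by
  rw [pvRowUpd_eq]; exact pvG_foldl_length d _ bc

theorem pvRowUpd_getD (bc : List Int) (d : List Char) (j : Nat) (hj : j < bc.length) :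
    (pvRowUpd bc d).getD j 0 =
      bc.getD j 0 + (if j < d.length ∧ pvCInt (d.getD j ' ') ≠ 0 then 1 else 0) := by
  rw [pvRowUpd_eq, pvG_foldl_getD d _ List.nodup_range bc j hj]
  simp [List.mem_range]

theorem pvColOnes_eq_countP (data : List String) (i : Nat) :
    pvColOnes data i =
      (data.countP
        (fun d => decide (i < d.toList.length ∧ pvCInt (d.toList.getD i ' ') ≠ 0)) : Int) := by
  unfold pvColOnes
  rw [PySem.List.foldl_ite_add_one]
  simp

theorem pvRows_getD (data : List String) (bc : List Int) (j : Nat) (hj : j < bc.length) :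
    (data.foldl (fun b d => pvRowUpd b d.toList) bc).getD j 0 =
      bc.getD j 0 + pvColOnes data j := by
  induction data generalizing bc with
  | nil => simp [pvColOnes]
  | cons d data ih =>
    simp only [List.foldl_cons]
    rw [ih _ (by rw [pvRowUpd_length]; omega), pvRowUpd_getD _ _ _ hj]
    rw [pvColOnes_eq_countP, pvColOnes_eq_countP, List.countP_cons]
    simp
    ring

theorem pvRows_length (data : List String) (bc : List Int) :
    (data.foldl (fun b d => pvRowUpd b d.toList) bc).length = bc.length := by
  induction data generalizing bc with
  | nil => rfl
  | cons d data ih => simp only [List.foldl_cons]; rw [ih, pvRowUpd_length]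

theorem pvBc_eq_map (data : List String) :
    (data.foldl (fun b d => pvRowUpd b d.toList)
        (List.replicate (data.headD "").toList.length 0)) =
      (List.range (data.headD "").toList.length).map (pvColOnes data) := by
  apply List.ext_getElem
  · rw [pvRows_length]; simp
  · intro j h1 h2
    have hj : j < (List.replicate (data.headD "").toList.length (0 : Int)).length := by
      rw [pvRows_length] at h1; exact h1
    have h := pvRows_getD data _ j hj
    rw [List.getD_eq_getElem _ _ h1] at h
    rw [h]
    simp at hj
    simp [hj]

theorem pvParseBin_append (s : List Char) (c : Char) :
    pvParseBin (s ++ [c]) = 2 * pvParseBin s + (if c = '1' then 1 else 0) := by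
  simp [pvParseBin, List.foldl_append]

theorem pvFold_parse (n : Int) (l : List Int) (s t : List Char) :
    (pvParseBin (l.foldl
        (fun (p : List Char × List Char) count =>
          if count > n - count then (p.1 ++ ['1'], p.2 ++ ['0'])
          else (p.1 ++ ['0'], p.2 ++ ['1'])) (s, t)).1,
     pvParseBin (l.foldl
        (fun (p : List Char × List Char) count =>
          if count > n - count then (p.1 ++ ['1'], p.2 ++ ['0'])
          else (p.1 ++ ['0'], p.2 ++ ['1'])) (s, t)).2) =
    l.foldl
      (fun (q : Int × Int) c =>
        if c > n - c then (q.1 * 2 + 1, q.2 * 2) else (q.1 * 2, q.2 * 2 + 1))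
      (pvParseBin s, pvParseBin t) := by
  induction l generalizing s t with
  | nil => rfl
  | cons c l ih =>
    simp only [List.foldl_cons]
    split_ifs with h
    · rw [ih]
      have h1 : (pvParseBin (s ++ ['1']), pvParseBin (t ++ ['0'])) =
          (pvParseBin s * 2 + 1, pvParseBin t * 2) := by
        simp [pvParseBin_append]; constructor <;> ring
      rw [h1]
    · rw [ih]
      have h1 : (pvParseBin (s ++ ['0']), pvParseBin (t ++ ['1'])) =
          (pvParseBin s * 2, pvParseBin t * 2 + 1) := by
        simp [pvParseBin_append]; constructor <;> ring
      rw [h1]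

-- ===== VERDICT (by name: the statement is the Claim_ definition above) =====
theorem find_gamma_and_epsilon_spec : Claim_equal_find_gamma_and_epsilon := by
  intro data _ _
  unfold Spec_find_gamma_and_epsilon find_gamma_and_epsilon find_gamma_and_epsilon_alt
  simp only []
  rw [pvBc_eq_map data]
  rw [List.foldl_map]
  have h := pvFold_parse (data.length : Int)
      ((List.range (data.headD "").toList.length).map (pvColOnes data)) [] []
  simp only [show pvParseBin ([] : List Char) = (0 : Int) from rfl] at h
  rw [List.foldl_map, List.foldl_map] at h
  rw [← h]
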